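-- pv_equiv track=rewrite | github.com/zhangzhefang-github/palantir-style-semantic-layer | tests/utils/snapshot_diff.py | diff_markdown_by_heading
-- ===== SOURCE A (Python) =====
-- from typing import Any, Dict, List, Tuple
--
-- def diff_markdown_by_heading(expected_md: str, actual_md: str) -> Dict[str, List[str]]:
--     expected_sections = _split_markdown_sections(expected_md)
--     actual_sections = _split_markdown_sections(actual_md)
--
--     expected_heads = set(expected_sections.keys())
--     actual_heads = set(actual_sections.keys())
--
--     added = sorted(actual_heads - expected_heads)
--     removed = sorted(expected_heads - actual_heads)
--     changed = []
--     for head in sorted(expected_heads & actual_heads):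
--         if expected_sections[head] != actual_sections[head]:
--             changed.append(head)
--
--     return {"added": added, "removed": removed, "changed": changed}
--
-- def _split_markdown_sections(md: str) -> Dict[str, str]:
--     sections: Dict[str, List[str]] = {}
--     current = "ROOT"
--     sections[current] = []
--     for line in md.splitlines():
--         if line.startswith("#"):
--             current = line.strip()
--             sections.setdefault(current, [])
--         sections[current].append(line)
--     return {k: "\n".join(v).strip() for k, v in sections.items()}
-- ===== SOURCE B (Python) =====
-- def _split_markdown_sections(md):
--     sections = {}
--     current = "ROOT"
--     sections[current] = []
--     for line in md.splitlines():
--         if line.startswith("#"):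
--             current = line.strip()
--             sections.setdefault(current, [])
--         sections[current].append(line)
--     return {k: "\n".join(v).strip() for k, v in sections.items()}
--
-- def diff_markdown_by_heading(expected_md, actual_md):
--     expected_sections = _split_markdown_sections(expected_md)
--     actual_sections = _split_markdown_sections(actual_md)
--     eh = sorted(expected_sections)
--     ah = sorted(actual_sections)
--     added, removed, changed = [], [], []
--     i = j = 0
--     # two-pointer merge of the two sorted key lists; no set operations,
--     # no membership tests: each comparison of the current heads classifies one head
--     while i < len(eh) and j < len(ah):
--         e, a = eh[i], ah[j]
--         if e < a:
--             removed.append(e)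
--             i += 1
--         elif a < e:
--             added.append(a)
--             j += 1
--         else:
--             if expected_sections[e] != actual_sections[a]:
--                 changed.append(e)
--             i += 1
--             j += 1
--     removed += eh[i:]
--     added += ah[j:]
--     return {"added": added, "removed": removed, "changed": changed}
-- ===== Notes on version B (the rewrite author's own statement) =====
-- stated objective: alternative
-- what changed: A classifies headings with three set operations (two sorted set differences and a loop over the sorted intersection, each with hash-membership tests); B sorts the two key lists and runs a classic two-pointer merge over them, classifying each heading by comparing the current heads, with no set operations or membership tests at all.
import Mathlib
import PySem

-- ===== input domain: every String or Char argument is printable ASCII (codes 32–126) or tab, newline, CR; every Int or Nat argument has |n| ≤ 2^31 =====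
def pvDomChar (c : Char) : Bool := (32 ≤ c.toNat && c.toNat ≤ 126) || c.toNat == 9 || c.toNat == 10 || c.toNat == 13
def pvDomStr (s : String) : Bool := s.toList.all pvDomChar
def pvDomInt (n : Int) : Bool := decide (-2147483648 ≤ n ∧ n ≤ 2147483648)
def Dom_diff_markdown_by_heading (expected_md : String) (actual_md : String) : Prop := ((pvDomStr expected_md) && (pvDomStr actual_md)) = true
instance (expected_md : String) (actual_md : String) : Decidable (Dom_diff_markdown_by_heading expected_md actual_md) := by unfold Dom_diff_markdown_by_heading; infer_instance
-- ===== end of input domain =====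

-- B replaces A's three set operations (two sorted set differences plus a loop over the sorted
-- intersection) with a two-pointer merge of the two sorted key lists ("alternative"): same value.

-- ===== PORT A =====
-- helper: _split_markdown_sections (identical helper in Source A and Source B, ported once)
def splitMarkdownSections (md : String) : PySem.Dict String String :=
  let init : PySem.Dict String (List String) × String :=
    (PySem.Dict.insert PySem.Dict.empty "ROOT" [], "ROOT")
  let st := (PySem.Str.splitlines md).foldl
    (fun (st : PySem.Dict String (List String) × String) line =>
      let (sections, current) := st
      if PySem.Str.startswith line "#" then
        let current := PySem.Str.strip line
        let sections := sections.setdefault current []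
        (sections.modify current [] (fun v => v ++ [line]), current)
      else
        (sections.modify current [] (fun v => v ++ [line]), current)) init
  PySem.Dict.ofList (st.1.items.map (fun kv => (kv.1, PySem.Str.strip (PySem.Str.join "\n" kv.2))))

def diff_markdown_by_heading (expected_md : String) (actual_md : String) : List (String × List String) :=
  let expected_sections := splitMarkdownSections expected_md
  let actual_sections := splitMarkdownSections actual_md
  let expected_heads : PySem.Set String := PySem.Set.ofList expected_sections.keys
  let actual_heads : PySem.Set String := PySem.Set.ofList actual_sections.keys
  let added := PySem.List.sorted (PySem.Set.diff actual_heads expected_heads) (fun x => x)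
  let removed := PySem.List.sorted (PySem.Set.diff expected_heads actual_heads) (fun x => x)
  let changed := (PySem.List.sorted (PySem.Set.inter expected_heads actual_heads) (fun x => x)).foldl
    (fun acc head =>
      if (decide (expected_sections.getD head "" ≠ actual_sections.getD head "")) then acc ++ [head] else acc) []
  [("added", added), ("removed", removed), ("changed", changed)]

-- ===== PORT B =====
-- Source B's while loop: a two-pointer merge over the two sorted key lists; the two index
-- variables i, j become structural descent on the two lists, appends become cons at the
-- recursion point (same order), and the trailing 'removed += eh[i:] / added += ah[j:]'
-- are the one-sided base cases.
def mergeDiff (es as : PySem.Dict String String) :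
    List String → List String → List String × List String × List String
  | [], ys => (ys, [], [])
  | x :: xs, [] => ([], x :: xs, [])
  | x :: xs, y :: ys =>
    if x < y then
      let r := mergeDiff es as xs (y :: ys)
      (r.1, x :: r.2.1, r.2.2)
    else if y < x then
      let r := mergeDiff es as (x :: xs) ys
      (y :: r.1, r.2.1, r.2.2)
    else
      let r := mergeDiff es as xs ys
      if decide (es.getD x "" ≠ as.getD y "") then (r.1, r.2.1, x :: r.2.2) else r
termination_by E A => E.length + A.length

def diff_markdown_by_heading_alt (expected_md : String) (actual_md : String) : List (String × List String) :=
  let expected_sections := splitMarkdownSections expected_md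
  let actual_sections := splitMarkdownSections actual_md
  let eh := PySem.List.sorted expected_sections.keys (fun x => x)
  let ah := PySem.List.sorted actual_sections.keys (fun x => x)
  let r := mergeDiff expected_sections actual_sections eh ah
  [("added", r.1), ("removed", r.2.1), ("changed", r.2.2)]

-- ===== PRECONDITION & SPEC =====
def Spec_diff_markdown_by_heading (expected_md : String) (actual_md : String) (out : List (String × List String)) : Prop := out = diff_markdown_by_heading_alt expected_md actual_md
instance (expected_md : String) (actual_md : String) (out : List (String × List String)) : Decidable (Spec_diff_markdown_by_heading expected_md actual_md out) := by unfold Spec_diff_markdown_by_heading; infer_instance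

-- ===== CLAIM (what is proved, stated in full; the proofs are below) =====
def Claim_equal_diff_markdown_by_heading : Prop := ∀ (expected_md : String) (actual_md : String), Dom_diff_markdown_by_heading expected_md actual_md → Spec_diff_markdown_by_heading expected_md actual_md (diff_markdown_by_heading expected_md actual_md)

-- ===== LEMMAS AND PROOFS =====

-- proof-only helper: the merged (union) key list the two pointers sweep through
def munion : List String → List String → List String
  | [], ys => ys
  | x :: xs, [] => x :: xs
  | x :: xs, y :: ys =>
    if x < y then x :: munion xs (y :: ys)
    else if y < x then y :: munion (x :: xs) ys
    else x :: munion xs ys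
termination_by E A => E.length + A.length

lemma mem_munion (E A : List String) (z : String) : z ∈ munion E A ↔ z ∈ E ∨ z ∈ A := by
  fun_induction munion E A with
  | case1 ys => simp
  | case2 x xs => simp
  | case3 x xs y ys h ih => simp only [List.mem_cons, ih]; tauto
  | case4 x xs y ys h h' ih => simp only [List.mem_cons, ih]; tauto
  | case5 x xs y ys h h' ih =>
    have hxy : x = y := le_antisymm (not_lt.mp h') (not_lt.mp h)
    subst hxy
    simp only [List.mem_cons, ih]; tauto

lemma munion_pairwise (E A : List String) (hE : E.Pairwise (· < ·)) (hA : A.Pairwise (· < ·)) :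
    (munion E A).Pairwise (· < ·) := by
  fun_induction munion E A with
  | case1 ys => exact hA
  | case2 x xs => exact hE
  | case3 x xs y ys h ih =>
    refine List.pairwise_cons.mpr ⟨?_, ih hE.of_cons hA⟩
    intro z hz
    rcases (mem_munion _ _ z).mp hz with hz | hz
    · exact (List.pairwise_cons.mp hE).1 z hz
    · rcases List.mem_cons.mp hz with rfl | hz
      · exact h
      · exact h.trans ((List.pairwise_cons.mp hA).1 z hz)
  | case4 x xs y ys h h' ih =>
    refine List.pairwise_cons.mpr ⟨?_, ih hE hA.of_cons⟩
    intro z hz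
    rcases (mem_munion _ _ z).mp hz with hz | hz
    · rcases List.mem_cons.mp hz with rfl | hz
      · exact h'
      · exact h'.trans ((List.pairwise_cons.mp hE).1 z hz)
    · exact (List.pairwise_cons.mp hA).1 z hz
  | case5 x xs y ys h h' ih =>
    have hxy : x = y := le_antisymm (not_lt.mp h') (not_lt.mp h)
    subst hxy
    refine List.pairwise_cons.mpr ⟨?_, ih hE.of_cons hA.of_cons⟩
    intro z hz
    rcases (mem_munion _ _ z).mp hz with hz | hz
    · exact (List.pairwise_cons.mp hE).1 z hz
    · exact (List.pairwise_cons.mp hA).1 z hz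

-- x smaller than the head of a strictly increasing list is not a member
lemma not_mem_of_lt_head (x y : String) (ys : List String)
    (hA : (y :: ys).Pairwise (· < ·)) (h : x < y) : x ∉ y :: ys := by
  intro hx
  rcases List.mem_cons.mp hx with rfl | hx
  · exact lt_irrefl x h
  · exact lt_irrefl x (h.trans ((List.pairwise_cons.mp hA).1 x hx))

-- the closed form of B's two-pointer merge: the three filters over the merged key list
lemma mergeDiff_eq (es as : PySem.Dict String String) (E A : List String)
    (hE : E.Pairwise (· < ·)) (hA : A.Pairwise (· < ·))
    (h1 : ∀ z ∈ A, es.contains z = decide (z ∈ E))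
    (h2 : ∀ z ∈ E, as.contains z = decide (z ∈ A))
    (h3 : ∀ z ∈ E, es.contains z = true)
    (h4 : ∀ z ∈ A, as.contains z = true) :
    mergeDiff es as E A =
      ((munion E A).filter (fun h => !(es.contains h)),
       (munion E A).filter (fun h => es.contains h && !(as.contains h)),
       (munion E A).filter (fun h => es.contains h && as.contains h &&
         decide (es.getD h "" ≠ as.getD h ""))) := by
  fun_induction mergeDiff es as E A with
  | case1 ys =>
    have he : ∀ z ∈ ys, es.contains z = false := by
      intro z hz; simpa using h1 z hz
    have e1 : ys.filter (fun h => !(es.contains h)) = ys :=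
      List.filter_eq_self.mpr (fun z hz => by simp [he z hz])
    have e2 : ys.filter (fun h => es.contains h && !(as.contains h)) = [] :=
      List.filter_eq_nil_iff.mpr (fun z hz => by simp [he z hz])
    have e3 : ys.filter (fun h => es.contains h && as.contains h &&
        decide (es.getD h "" ≠ as.getD h "")) = [] :=
      List.filter_eq_nil_iff.mpr (fun z hz => by simp [he z hz])
    simp only [munion, e1, e2, e3]
  | case2 x xs =>
    have ha : ∀ z ∈ x :: xs, as.contains z = false := by
      intro z hz; simpa using h2 z hz
    have e1 : (x :: xs).filter (fun h => !(es.contains h)) = [] :=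
      List.filter_eq_nil_iff.mpr (fun z hz => by simp [h3 z hz])
    have e2 : (x :: xs).filter (fun h => es.contains h && !(as.contains h)) = x :: xs :=
      List.filter_eq_self.mpr (fun z hz => by simp [h3 z hz, ha z hz])
    have e3 : (x :: xs).filter (fun h => es.contains h && as.contains h &&
        decide (es.getD h "" ≠ as.getD h "")) = [] :=
      List.filter_eq_nil_iff.mpr (fun z hz => by simp [ha z hz])
    simp only [munion, e1, e2, e3]
  | case3 x xs y ys h r ih =>
    have hxc : es.contains x = true := h3 x (List.mem_cons_self ..)
    have hxa : as.contains x = false := by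
      have := h2 x (List.mem_cons_self ..)
      simpa [not_mem_of_lt_head x y ys hA h] using this
    have hr : r = _ := ih hE.of_cons hA
      (fun z hz => by
        have hzx : z ≠ x := by
          rintro rfl
          exact not_mem_of_lt_head z y ys hA h hz
        have := h1 z hz; simpa [hzx] using this)
      (fun z hz => h2 z (List.mem_cons_of_mem _ hz))
      (fun z hz => h3 z (List.mem_cons_of_mem _ hz))
      h4
    rw [hr]
    have hm : munion (x :: xs) (y :: ys) = x :: munion xs (y :: ys) := by
      simp only [munion, if_pos h]
    rw [hm]
    simp [hxc, hxa]
  | case4 x xs y ys h h' r ih =>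
    have hyc : as.contains y = true := h4 y (List.mem_cons_self ..)
    have hye : es.contains y = false := by
      have := h1 y (List.mem_cons_self ..)
      simpa [not_mem_of_lt_head y x xs hE h'] using this
    have hr : r = _ := ih hE hA.of_cons
      (fun z hz => h1 z (List.mem_cons_of_mem _ hz))
      (fun z hz => by
        have hzy : z ≠ y := by
          rintro rfl
          exact not_mem_of_lt_head z x xs hE h' hz
        have := h2 z hz; simpa [hzy] using this)
      h3
      (fun z hz => h4 z (List.mem_cons_of_mem _ hz))
    rw [hr]
    have hm : munion (x :: xs) (y :: ys) = y :: munion (x :: xs) ys := by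
      simp only [munion, if_neg h, if_pos h']
    rw [hm]
    simp [hyc, hye]
  | case5 x xs y ys h h' r hne ih =>
    have hxy : x = y := le_antisymm (not_lt.mp h') (not_lt.mp h)
    subst hxy
    have hxc : es.contains x = true := h3 x (List.mem_cons_self ..)
    have hxa : as.contains x = true := h4 x (List.mem_cons_self ..)
    have hxxs : x ∉ xs := fun hx => lt_irrefl x ((List.pairwise_cons.mp hE).1 x hx)
    have hxys : x ∉ ys := fun hx => lt_irrefl x ((List.pairwise_cons.mp hA).1 x hx)
    have hr : r = _ := ih hE.of_cons hA.of_cons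
      (fun z hz => by
        have hzx : z ≠ x := by rintro rfl; exact hxys hz
        have := h1 z (List.mem_cons_of_mem _ hz); simpa [hzx] using this)
      (fun z hz => by
        have hzx : z ≠ x := by rintro rfl; exact hxxs hz
        have := h2 z (List.mem_cons_of_mem _ hz); simpa [hzx] using this)
      (fun z hz => h3 z (List.mem_cons_of_mem _ hz))
      (fun z hz => h4 z (List.mem_cons_of_mem _ hz))
    rw [hr]
    have hm : munion (x :: xs) (x :: ys) = x :: munion xs ys := by
      simp only [munion, if_neg h]
    rw [hm]
    have hne' : es.getD x "" ≠ as.getD x "" := by simpa using hne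
    simp [hxc, hxa, hne']
  | case6 x xs y ys h h' r hne ih =>
    have hxy : x = y := le_antisymm (not_lt.mp h') (not_lt.mp h)
    subst hxy
    have hxc : es.contains x = true := h3 x (List.mem_cons_self ..)
    have hxa : as.contains x = true := h4 x (List.mem_cons_self ..)
    have hxxs : x ∉ xs := fun hx => lt_irrefl x ((List.pairwise_cons.mp hE).1 x hx)
    have hxys : x ∉ ys := fun hx => lt_irrefl x ((List.pairwise_cons.mp hA).1 x hx)
    have hr : r = _ := ih hE.of_cons hA.of_cons
      (fun z hz => by
        have hzx : z ≠ x := by rintro rfl; exact hxys hz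
        have := h1 z (List.mem_cons_of_mem _ hz); simpa [hzx] using this)
      (fun z hz => by
        have hzx : z ≠ x := by rintro rfl; exact hxxs hz
        have := h2 z (List.mem_cons_of_mem _ hz); simpa [hzx] using this)
      (fun z hz => h3 z (List.mem_cons_of_mem _ hz))
      (fun z hz => h4 z (List.mem_cons_of_mem _ hz))
    rw [hr]
    have hm : munion (x :: xs) (x :: ys) = x :: munion xs ys := by
      simp only [munion, if_neg h]
    rw [hm]
    have hne' : ¬ (es.getD x "" ≠ as.getD x "") := by simpa using hne
    simp [hxc, hxa, hne']

-- a strictly increasing list with the same members as another strictly increasing list equals it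
lemma eq_of_pairwise_lt_of_mem_iff (l₁ l₂ : List String)
    (h₁ : List.Pairwise (· < ·) l₁) (h₂ : List.Pairwise (· < ·) l₂)
    (hm : ∀ x, x ∈ l₁ ↔ x ∈ l₂) : l₁ = l₂ := by
  have nd₁ : l₁.Nodup := h₁.imp ne_of_lt
  have nd₂ : l₂.Nodup := h₂.imp ne_of_lt
  have hperm : l₁.Perm l₂ := (List.perm_ext_iff_of_nodup nd₁ nd₂).mpr hm
  have e₁ : PySem.List.sorted l₂ (fun x => x) = l₁ :=
    PySem.List.sorted_eq_of_perm_of_pairwise_lt l₂ l₁ (fun x => x) hperm h₁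
  have e₂ : PySem.List.sorted l₂ (fun x => x) = l₂ :=
    PySem.List.sorted_eq_self_of_pairwise l₂ (fun x => x) (h₂.imp le_of_lt)
  exact e₁.symm.trans e₂

-- sorted of a duplicate-free list is strictly increasing
lemma sorted_pairwise_lt_of_nodup (xs : List String) (h : xs.Nodup) :
    List.Pairwise (· < ·) (PySem.List.sorted xs (fun x => x)) := by
  have hle := PySem.List.sorted_pairwise xs (fun x => x)
  have hnd : (PySem.List.sorted xs (fun x => x)).Nodup :=
    (PySem.List.sorted_perm xs (fun x => x) false).symm.nodup h
  exact (hle.and hnd).imp (fun hab => lt_of_le_of_ne hab.1 hab.2)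

-- the two functions agree for ANY pair of section dictionaries with duplicate-free keys
lemma diff_core (es as : PySem.Dict String String)
    (hndE : es.keys.Nodup) (hndA : as.keys.Nodup) :
    ([("added", PySem.List.sorted (PySem.Set.diff (PySem.Set.ofList as.keys) (PySem.Set.ofList es.keys)) (fun x => x)),
      ("removed", PySem.List.sorted (PySem.Set.diff (PySem.Set.ofList es.keys) (PySem.Set.ofList as.keys)) (fun x => x)),
      ("changed", (PySem.List.sorted (PySem.Set.inter (PySem.Set.ofList es.keys) (PySem.Set.ofList as.keys)) (fun x => x)).foldl
        (fun acc head => if (decide (es.getD head "" ≠ as.getD head "")) then acc ++ [head] else acc) [])] : List (String × List String))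
    =
    (let r := mergeDiff es as (PySem.List.sorted es.keys (fun x => x)) (PySem.List.sorted as.keys (fun x => x))
     [("added", r.1), ("removed", r.2.1), ("changed", r.2.2)]) := by
  have hndE' : (PySem.Set.ofList es.keys : List String).Nodup := PySem.Set.nodup_ofList es.keys
  have hndA' : (PySem.Set.ofList as.keys : List String).Nodup := PySem.Set.nodup_ofList as.keys
  -- the two sorted key lists and their strictness
  set E := PySem.List.sorted es.keys (fun x => x) with hEdef
  set A := PySem.List.sorted as.keys (fun x => x) with hAdef
  have hE : E.Pairwise (· < ·) := sorted_pairwise_lt_of_nodup _ hndE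
  have hA : A.Pairwise (· < ·) := sorted_pairwise_lt_of_nodup _ hndA
  have hmemE : ∀ z, z ∈ E ↔ z ∈ es.keys := fun z => PySem.List.mem_sorted es.keys _ _ z
  have hmemA : ∀ z, z ∈ A ↔ z ∈ as.keys := fun z => PySem.List.mem_sorted as.keys _ _ z
  have hcE : ∀ z, es.contains z = decide (z ∈ E) := by
    intro z
    rw [PySem.Dict.contains_eq_decide_mem_keys]
    simp [hmemE z]
  have hcA : ∀ z, as.contains z = decide (z ∈ A) := by
    intro z
    rw [PySem.Dict.contains_eq_decide_mem_keys]
    simp [hmemA z]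
  -- B's merge as three filters over munion
  have hB := mergeDiff_eq es as E A hE hA
    (fun z _ => hcE z) (fun z _ => hcA z)
    (fun z hz => by simp [hcE z, hz]) (fun z hz => by simp [hcA z, hz])
  -- munion E A is the sorted union
  have hU : PySem.Set.union (PySem.Set.ofList es.keys) (PySem.Set.ofList as.keys)
      = PySem.Set.ofList (es.keys ++ PySem.Set.ofList as.keys) := by
    rw [PySem.Set.ofList_append]; rfl
  have hUlt : List.Pairwise (· < ·)
      (PySem.List.sorted (PySem.Set.union (PySem.Set.ofList es.keys) (PySem.Set.ofList as.keys)) (fun x => x)) := by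
    rw [hU]; exact PySem.List.sorted_ofList_pairwise_lt _
  have hmemU : ∀ x, x ∈ PySem.List.sorted
      (PySem.Set.union (PySem.Set.ofList es.keys) (PySem.Set.ofList as.keys)) (fun x => x)
      ↔ (x ∈ es.keys ∨ x ∈ as.keys) := by
    intro x
    rw [PySem.List.mem_sorted, PySem.Set.mem_union, PySem.Set.mem_ofList, PySem.Set.mem_ofList]
  have hmun : munion E A
      = PySem.List.sorted (PySem.Set.union (PySem.Set.ofList es.keys) (PySem.Set.ofList as.keys)) (fun x => x) := by
    apply eq_of_pairwise_lt_of_mem_iff _ _ (munion_pairwise E A hE hA) hUlt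
    intro x
    rw [mem_munion, hmemU x, hmemE x, hmemA x]
  -- A's three set passes as the same three filters
  have h1 : PySem.List.sorted (PySem.Set.diff (PySem.Set.ofList as.keys) (PySem.Set.ofList es.keys)) (fun x => x)
      = (munion E A).filter (fun h => !(es.contains h)) := by
    rw [hmun]
    apply eq_of_pairwise_lt_of_mem_iff
    · exact sorted_pairwise_lt_of_nodup _ (PySem.Set.nodup_diff _ _ hndA')
    · exact hUlt.filter _
    · intro x
      rw [PySem.List.mem_sorted, PySem.Set.mem_diff, PySem.Set.mem_ofList, PySem.Set.mem_ofList,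
        List.mem_filter]
      rw [hmemU x]
      simp [PySem.Dict.contains_eq_decide_mem_keys]
      tauto
  have h2 : PySem.List.sorted (PySem.Set.diff (PySem.Set.ofList es.keys) (PySem.Set.ofList as.keys)) (fun x => x)
      = (munion E A).filter (fun h => es.contains h && !(as.contains h)) := by
    rw [hmun]
    apply eq_of_pairwise_lt_of_mem_iff
    · exact sorted_pairwise_lt_of_nodup _ (PySem.Set.nodup_diff _ _ hndE')
    · exact hUlt.filter _
    · intro x
      rw [PySem.List.mem_sorted, PySem.Set.mem_diff, PySem.Set.mem_ofList, PySem.Set.mem_ofList,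
        List.mem_filter]
      rw [hmemU x]
      simp [PySem.Dict.contains_eq_decide_mem_keys]
      tauto
  have h3 : List.map (fun h => h)
        ((PySem.List.sorted (PySem.Set.inter (PySem.Set.ofList es.keys) (PySem.Set.ofList as.keys)) (fun x => x)).filter
          (fun head => decide (es.getD head "" ≠ as.getD head "")))
      = (munion E A).filter
          (fun h => es.contains h && as.contains h && decide (es.getD h "" ≠ as.getD h "")) := by
    rw [hmun, List.map_id']
    apply eq_of_pairwise_lt_of_mem_iff
    · exact (sorted_pairwise_lt_of_nodup _ (PySem.Set.nodup_inter _ _ hndE')).filter _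
    · exact hUlt.filter _
    · intro x
      rw [List.mem_filter, List.mem_filter, PySem.List.mem_sorted, PySem.Set.mem_inter,
        PySem.Set.mem_ofList, PySem.Set.mem_ofList]
      rw [hmemU x]
      simp [PySem.Dict.contains_eq_decide_mem_keys]
      tauto
  show _ = ([("added", (mergeDiff es as E A).1), ("removed", (mergeDiff es as E A).2.1),
             ("changed", (mergeDiff es as E A).2.2)] : List (String × List String))
  rw [hB]
  rw [PySem.List.foldl_append_if (fun head => decide (es.getD head "" ≠ as.getD head "")) (fun h => h)]
  rw [h1, h2, h3]
  simp

-- the section dictionary always has duplicate-free keys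
lemma nodup_keys_split (md : String) : (splitMarkdownSections md).keys.Nodup := by
  unfold splitMarkdownSections
  exact PySem.Dict.nodup_keys_ofList _

-- ===== VERDICT (by name: the statement is the Claim_ definition above) =====
theorem diff_markdown_by_heading_spec : Claim_equal_diff_markdown_by_heading := by
  intro e a _
  show diff_markdown_by_heading e a = diff_markdown_by_heading_alt e a
  exact diff_core (splitMarkdownSections e) (splitMarkdownSections a)
    (nodup_keys_split e) (nodup_keys_split a)
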